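-- pv_equiv track=rewrite | github.com/Aletheia-Verification/Aletheia | parse_conditions.py | _split_inline_perform_body
-- ===== SOURCE A (Python) =====
-- _PERFORM_BODY_VERBS = [
--     'INITIALIZE', 'UNSTRING', 'SUBTRACT', 'MULTIPLY', 'EVALUATE',
--     'INSPECT', 'COMPUTE', 'DISPLAY', 'PERFORM', 'DIVIDE', 'STRING',
--     'SEARCH', 'WRITE', 'CLOSE', 'MOVE', 'CALL', 'READ', 'OPEN',
--     'SORT', 'STOP', 'EXIT', 'ADD', 'SET', 'GOTO', 'IF',
-- ]
--
-- def _split_inline_perform_body(text):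
--     """Split PERFORM VARYING UNTIL text into (condition, body_text).
--
--     When PERFORM VARYING appears inside IF/EVALUATE branches, ANTLR getText()
--     concatenates the UNTIL condition with the loop body and END-PERFORM.
--     Example: "WS-IDX>8ADDWS-XTOWS-YEND-PERFORM" -> ("WS-IDX>8", "ADDWS-XTOWS-Y")
--
--     Returns (condition_text, body_text) where body_text is "" if no inline body.
--     """
--     upper = text.upper().strip()
--     original = text.strip()
--
--     # No END-PERFORM at end -> no inline body
--     if not upper.endswith('END-PERFORM'):
--         return original, ""
--
--     # Strip END-PERFORM, also handle nested END-IF/END-EVALUATE before it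
--     trimmed = original[:-len('END-PERFORM')]
--     upper_trimmed = upper[:-len('END-PERFORM')]
--
--     if not trimmed:
--         return "", ""
--
--     # Find where UNTIL condition ends and body statements begin.
--     # In getText() blobs variable names preserve hyphens (WS-FOO-BAR)
--     # but tokens are concatenated without spaces.
--     # Rule: a body verb is NOT preceded by '-' and NOT followed by '-'.
--     best_pos = len(upper_trimmed)
--
--     for verb in _PERFORM_BODY_VERBS:
--         pos = 2  # Need at least some condition text
--         while pos < best_pos:
--             idx = upper_trimmed.find(verb, pos)
--             if idx < 0 or idx >= best_pos:
--                 break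
--             # Not preceded by hyphen (would be part of variable name)
--             if idx > 0 and upper_trimmed[idx - 1] == '-':
--                 pos = idx + len(verb)
--                 continue
--             # Not followed by hyphen (would be variable name component)
--             end = idx + len(verb)
--             if end < len(upper_trimmed) and upper_trimmed[end] == '-':
--                 pos = idx + len(verb)
--                 continue
--             best_pos = idx
--             break
--
--     if best_pos < len(upper_trimmed):
--         return trimmed[:best_pos], trimmed[best_pos:]
--     else:
--         return trimmed, ""
-- ===== SOURCE B (Python) =====
-- _PERFORM_BODY_VERBS = [
--     'INITIALIZE', 'UNSTRING', 'SUBTRACT', 'MULTIPLY', 'EVALUATE',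
--     'INSPECT', 'COMPUTE', 'DISPLAY', 'PERFORM', 'DIVIDE', 'STRING',
--     'SEARCH', 'WRITE', 'CLOSE', 'MOVE', 'CALL', 'READ', 'OPEN',
--     'SORT', 'STOP', 'EXIT', 'ADD', 'SET', 'GOTO', 'IF',
-- ]
--
--
-- def _split_inline_perform_body(text):
--     """Split PERFORM VARYING UNTIL text into (condition, body_text)."""
--     upper = text.upper().strip()
--     original = text.strip()
--
--     if not upper.endswith('END-PERFORM'):
--         return original, ""
--
--     trimmed = original[:-11]
--     ut = upper[:-11]
--
--     if not trimmed:
--         return "", ""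
--
--     n = len(ut)
--     # Single left-to-right positional scan: the first position >= 2 where some
--     # verb starts and is not hyphen-adjacent is the split point.
--     for i in range(2, n):
--         if ut[i - 1] == '-':
--             continue
--         for verb in _PERFORM_BODY_VERBS:
--             e = i + len(verb)
--             if ut[i:e] == verb and not (e < n and ut[e] == '-'):
--                 return trimmed[:i], trimmed[i:]
--     return trimmed, ""
-- ===== Notes on version B (the rewrite author's own statement) =====
-- stated objective: alternative
-- what changed: A runs one repeated-find scan per verb with break/continue and a shared shrinking best_pos; B makes a single left-to-right scan over positions i>=2 and at each position tests whether any verb matches there without hyphen adjacency, returning at the first hit.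
-- intended difference: On texts ending in END-PERFORM whose trimmed upper text contains a hyphen-prefixed overlapping EVALUATE pair (the pattern '-EVALUATEVALUATE' at index >= 1, not followed by another hyphen) whose second EVALUATE occurrence is the first non-hyphen-adjacent verb start, A's per-verb find loop jumps past that occurrence and returns a later split or the whole text with empty body, while B splits at it, which is the intended body-verb boundary. — e.g. on _split_inline_perform_body("X-EVALUATEVALUATEEND-PERFORM"): A returns ("X-EVALUATEVALUATE", ""), B returns ("X-EVALUAT", "EVALUATE")
import Mathlib
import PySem

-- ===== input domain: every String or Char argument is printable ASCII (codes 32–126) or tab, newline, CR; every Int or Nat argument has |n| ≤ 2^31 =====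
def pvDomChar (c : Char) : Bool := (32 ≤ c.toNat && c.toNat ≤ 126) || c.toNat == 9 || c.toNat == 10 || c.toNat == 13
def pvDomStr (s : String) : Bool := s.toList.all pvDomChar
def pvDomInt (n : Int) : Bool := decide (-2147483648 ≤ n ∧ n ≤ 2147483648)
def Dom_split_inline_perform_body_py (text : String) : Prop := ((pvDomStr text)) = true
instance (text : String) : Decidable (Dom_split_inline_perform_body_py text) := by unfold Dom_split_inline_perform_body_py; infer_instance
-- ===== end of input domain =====

-- B replaces A's per-verb repeated .find scans (with a shared shrinking best_pos) by one
-- left-to-right positional scan that returns at the first non-hyphen-adjacent verb start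
-- (objective: alternative); B intentionally differs on the '-EVALUATEVALUATE' inputs of D_.

def pvVerbs : List String :=
  ["INITIALIZE", "UNSTRING", "SUBTRACT", "MULTIPLY", "EVALUATE",
   "INSPECT", "COMPUTE", "DISPLAY", "PERFORM", "DIVIDE", "STRING",
   "SEARCH", "WRITE", "CLOSE", "MOVE", "CALL", "READ", "OPEN",
   "SORT", "STOP", "EXIT", "ADD", "SET", "GOTO", "IF"]

-- ===== PORT A =====
-- A's inner while loop; fuel is only a totality guard (ut.length + 1 always suffices).
def pvLoopA (ut verb : List Char) : Nat → Int → Int → Int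
  | 0, best, _ => best
  | fuel+1, best, pos =>
    if pos < best then
      let idx := PySem.Chars.findFrom ut verb pos none
      if idx < 0 ∨ best ≤ idx then best
      else if 0 < idx ∧ PySem.List.pyGet? ut (idx - 1) = some '-' then
        pvLoopA ut verb fuel best (idx + (verb.length : Int))
      else if idx + (verb.length : Int) < (ut.length : Int) ∧
              PySem.List.pyGet? ut (idx + (verb.length : Int)) = some '-' then
        pvLoopA ut verb fuel best (idx + (verb.length : Int))
      else idx
    else best

def pvBestA (ut : List Char) : Int :=
  pvVerbs.foldl (fun best v => pvLoopA ut v.toList (ut.length + 1) best 2) (ut.length : Int)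

def split_inline_perform_body_py (text : String) : String × String :=
  let upper := PySem.Str.strip (PySem.Str.upper text)
  let original := PySem.Str.strip text
  if PySem.Str.endswith upper "END-PERFORM" = false then (original, "")
  else
    let trimmed := PySem.Str.slice original none (some (-11))
    let upper_trimmed := PySem.Str.slice upper none (some (-11))
    if trimmed = "" then ("", "")
    else
      let ut := upper_trimmed.toList
      let best := pvBestA ut
      if best < (ut.length : Int) then
        (PySem.Str.slice trimmed none (some best), PySem.Str.slice trimmed (some best) none)
      else (trimmed, "")

-- ===== PORT B =====
-- B's body: scan i = 2 .. n-1 in order; stop at the first i where ut[i-1] ≠ '-' and some verb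
-- matches at i without a following hyphen.
def pvValidAt (ut : List Char) (i : Int) : Bool :=
  !(PySem.List.pyGet? ut (i - 1) == some '-') &&
  pvVerbs.any (fun v =>
    (PySem.List.slice ut (some i) (some (i + (v.toList.length : Int))) == v.toList) &&
    !(decide (i + (v.toList.length : Int) < (ut.length : Int)) &&
      (PySem.List.pyGet? ut (i + (v.toList.length : Int)) == some '-')))

def split_inline_perform_body_py_alt (text : String) : String × String :=
  let upper := PySem.Str.strip (PySem.Str.upper text)
  let original := PySem.Str.strip text
  if PySem.Str.endswith upper "END-PERFORM" = false then (original, "")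
  else
    let trimmed := PySem.Str.slice original none (some (-11))
    let upper_trimmed := PySem.Str.slice upper none (some (-11))
    if trimmed = "" then ("", "")
    else
      let ut := upper_trimmed.toList
      match (PySem.List.pyRange 2 (ut.length : Int) 1).find? (fun i => pvValidAt ut i) with
      | some i => (PySem.Str.slice trimmed none (some i), PySem.Str.slice trimmed (some i) none)
      | none => (trimmed, "")

-- ===== PRECONDITION & SPEC =====
def pvPattern : List Char := "-EVALUATEVALUATE".toList

-- change region on the trimmed upper text: a hyphen-prefixed overlapping EVALUATE pair whose
-- second (valid) occurrence is the first position where a verb starts non-hyphen-adjacent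
def pvDiffCore (ut : List Char) : Prop :=
  ∃ k ∈ List.range ut.length, 1 ≤ k ∧ pvPattern <+: ut.drop k ∧ ut[k + 16]? ≠ some '-' ∧
    ∀ i ∈ List.range (k + 8), ∀ s ∈ pvVerbs,
      ¬(2 ≤ i ∧ s.toList <+: ut.drop i ∧ ut[i - 1]? ≠ some '-' ∧
        ut[i + s.toList.length]? ≠ some '-')

-- On texts ending in END-PERFORM whose trimmed upper text contains '-EVALUATEVALUATE' whose
-- second EVALUATE occurrence is the first valid (non-hyphen-adjacent) verb position, A's
-- per-verb find loop jumps past that occurrence (returning a later split or the whole text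
-- with empty body), while B splits at it, which is the intended body-verb boundary.
def D_split_inline_perform_body_py (text : String) : Prop :=
  PySem.Str.endswith (PySem.Str.strip (PySem.Str.upper text)) "END-PERFORM" = true ∧
  PySem.Str.slice (PySem.Str.strip text) none (some (-11)) ≠ "" ∧
  pvDiffCore (PySem.Str.slice (PySem.Str.strip (PySem.Str.upper text)) none (some (-11))).toList

instance (text : String) : Decidable (D_split_inline_perform_body_py text) := by
  unfold D_split_inline_perform_body_py pvDiffCore; infer_instance

def Spec_split_inline_perform_body_py (text : String) (out : String × String) : Prop :=
  ¬ D_split_inline_perform_body_py text → out = split_inline_perform_body_py_alt text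
instance (text : String) (out : String × String) : Decidable (Spec_split_inline_perform_body_py text out) := by
  unfold Spec_split_inline_perform_body_py; infer_instance

def pvDiffWitness_split_inline_perform_body_py : String := "X-EVALUATEVALUATEEND-PERFORM"
def pvDiffWitnessOut_split_inline_perform_body_py : (String × String) × (String × String) :=
  (("X-EVALUATEVALUATE", ""), ("X-EVALUAT", "EVALUATE"))

-- ===== CLAIM (what is proved, stated in full; the proofs are below) =====
def Claim_unchanged_split_inline_perform_body_py : Prop := ∀ (text : String), Dom_split_inline_perform_body_py text → Spec_split_inline_perform_body_py text (split_inline_perform_body_py text)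
def Claim_changed_split_inline_perform_body_py : Prop := Dom_split_inline_perform_body_py (pvDiffWitness_split_inline_perform_body_py) ∧ D_split_inline_perform_body_py (pvDiffWitness_split_inline_perform_body_py) ∧ split_inline_perform_body_py (pvDiffWitness_split_inline_perform_body_py) = pvDiffWitnessOut_split_inline_perform_body_py.1 ∧ split_inline_perform_body_py_alt (pvDiffWitness_split_inline_perform_body_py) = pvDiffWitnessOut_split_inline_perform_body_py.2 ∧ pvDiffWitnessOut_split_inline_perform_body_py.1 ≠ pvDiffWitnessOut_split_inline_perform_body_py.2

def Claim_exact_split_inline_perform_body_py : Prop := ∀ (text : String), Dom_split_inline_perform_body_py text → D_split_inline_perform_body_py text → split_inline_perform_body_py text ≠ split_inline_perform_body_py_alt text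

-- ===== LEMMAS AND PROOFS =====

-- Proof-side decomposition of A's per-verb loop: first valid occurrence with skip semantics,
-- independent of the shared best bound. Fuel is a totality guard.
def pvFirstValid (ut verb : List Char) : Nat → Int → Int
  | 0, _ => (ut.length : Int)
  | fuel+1, pos =>
    let idx := PySem.Chars.findFrom ut verb pos none
    if idx < 0 then (ut.length : Int)
    else
      let e := idx + (verb.length : Int)
      if (0 < idx ∧ PySem.List.pyGet? ut (idx - 1) = some '-') ∨
         (e < (ut.length : Int) ∧ PySem.List.pyGet? ut e = some '-') then
        pvFirstValid ut verb fuel e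
      else idx

-- valid occurrence of verb v at position i (prefix form; proof-side)
def pvVOcc (ut v : List Char) (i : Int) : Prop :=
  2 ≤ i ∧ i + (v.length : Int) ≤ (ut.length : Int) ∧ v <+: ut.drop i.toNat ∧
  PySem.List.pyGet? ut (i - 1) ≠ some '-' ∧
  ¬(i + (v.length : Int) < (ut.length : Int) ∧ PySem.List.pyGet? ut (i + (v.length : Int)) = some '-')

-- bridge between the D_-side occurrence formula (Nat indices, getElem?) and pvVOcc
theorem pvVOccN_iff (ut v : List Char) (m : Nat) (hv : 1 ≤ v.length) :
    (2 ≤ m ∧ v <+: ut.drop m ∧ ut[m - 1]? ≠ some '-' ∧ ut[m + v.length]? ≠ some '-')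
      ↔ pvVOcc ut v (m : Int) := by
  unfold pvVOcc
  have hc1 : ((m : Int)).toNat = m := by omega
  constructor
  · rintro ⟨h2, hpre, hprev, hfol⟩
    have hl := hpre.length_le
    rw [List.length_drop] at hl
    have hmn : m < ut.length := by omega
    refine ⟨by omega, by omega, by rw [hc1]; exact hpre, ?_, ?_⟩
    · have hc : (m : Int) - 1 = ((m - 1 : Nat) : Int) := by omega
      rw [hc, PySem.List.pyGet?_natCast]
      exact hprev
    · rintro ⟨hlt, hel⟩
      apply hfol
      have hc : (m : Int) + (v.length : Int) = ((m + v.length : Nat) : Int) := by omega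
      rw [hc, PySem.List.pyGet?_natCast] at hel
      exact hel
  · rintro ⟨h2, hfit, hpre, hprev, hfol⟩
    rw [hc1] at hpre
    refine ⟨by omega, hpre, ?_, ?_⟩
    · have hc : (m : Int) - 1 = ((m - 1 : Nat) : Int) := by omega
      rw [hc, PySem.List.pyGet?_natCast] at hprev
      exact hprev
    · intro hel
      apply hfol
      obtain ⟨hlt, -⟩ := List.getElem?_eq_some_iff.mp hel
      have hc : (m : Int) + (v.length : Int) = ((m + v.length : Nat) : Int) := by omega
      refine ⟨by omega, ?_⟩
      rw [hc, PySem.List.pyGet?_natCast]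
      exact hel

-- slice test ↔ prefix form
theorem pvSliceEq (ut v : List Char) (i : Int) (h0 : 0 ≤ i) (hv : 1 ≤ v.length) :
    PySem.List.slice ut (some i) (some (i + (v.length : Int))) = v ↔
      (v <+: ut.drop i.toNat ∧ i + (v.length : Int) ≤ (ut.length : Int)) := by
  rw [PySem.List.slice_toNat ut h0 (by omega)]
  have ht : (i + (v.length : Int)).toNat - i.toNat = v.length := by omega
  rw [ht]
  constructor
  · intro h
    have hpre : (ut.drop i.toNat).take v.length <+: ut.drop i.toNat := List.take_prefix _ _
    rw [h] at hpre
    have hlen : ((ut.drop i.toNat).take v.length).length = v.length := by rw [h]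
    simp only [List.length_take, List.length_drop] at hlen
    have h2 : v.length ≤ ut.length - i.toNat := by
      rw [← hlen]; exact Nat.min_le_right _ _
    exact ⟨hpre, by omega⟩
  · rintro ⟨hpre, _⟩
    exact (List.prefix_iff_eq_take.mp hpre).symm

-- findFrom with a nonnegative start: either -1, or an index ≥ start whose occurrence fits in s.
theorem pvFF (s v : List Char) (p : Int) (hp : 0 ≤ p) :
    PySem.Chars.findFrom s v p none = -1 ∨
      (p ≤ PySem.Chars.findFrom s v p none ∧ 0 ≤ PySem.Chars.findFrom s v p none ∧
       PySem.Chars.findFrom s v p none + (v.length : Int) ≤ (s.length : Int)) := by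
  unfold PySem.Chars.findFrom
  simp only [if_neg (by omega : ¬ p < 0)]
  by_cases h1 : (s.length : Int) < p
  · simp [h1]
  · rw [if_neg h1]
    have htake : List.take ((s.length : Int)).toNat s = s := by simp
    rw [htake]
    by_cases h2 : PySem.Chars.find (List.drop p.toNat s) v = -1
    · simp [h2]
    · rw [if_neg h2]
      right
      have hge : 0 ≤ PySem.Chars.find (List.drop p.toNat s) v := by
        have := PySem.Chars.neg_one_le_find (List.drop p.toNat s) v
        omega
      have hsp := (PySem.Chars.find_spec (s := List.drop p.toNat s) (sub := v) hge).1
      have hlen := hsp.length_le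
      rw [List.drop_drop, List.length_drop] at hlen
      have hfl := PySem.Chars.find_le_length (List.drop p.toNat s) v
      rw [List.length_drop] at hfl
      have hpn : p.toNat = p := by omega
      exact ⟨by omega, by omega, by omega⟩

-- if findFrom = -1 there is no fitting occurrence at or after the start
theorem pvFindNeg (ut v : List Char) (pos : Int) (h0 : 0 ≤ pos)
    (hneg : PySem.Chars.findFrom ut v pos none = -1) :
    ∀ j : Int, pos ≤ j → j + (v.length : Int) ≤ (ut.length : Int) →
      ¬ v <+: ut.drop j.toNat := by
  intro j hj hfit hpre
  have hjn : j.toNat ≤ ut.length := by omega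
  have hposn : pos ≤ (ut.length : Int) := by omega
  have hcast : pos = ((pos.toNat : Nat) : Int) := by omega
  rw [hcast] at hneg
  have hni := (PySem.Chars.findFrom_natCast_eq_neg_one_iff ut v pos.toNat (by omega)).mp hneg
  apply hni
  have he : (ut.drop pos.toNat).drop (j.toNat - pos.toNat) = ut.drop j.toNat := by
    rw [List.drop_drop]; congr 1; omega
  exact hpre.isInfix.trans (he ▸ List.drop_suffix (j.toNat - pos.toNat) (ut.drop pos.toNat)).isInfix

-- if findFrom ≥ 0 it is the first fitting occurrence at or after the start
theorem pvFindPos (ut v : List Char) (pos : Int) (h0 : 0 ≤ pos)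
    (hpos : ¬ PySem.Chars.findFrom ut v pos none < 0) :
    pos ≤ PySem.Chars.findFrom ut v pos none ∧
    v <+: ut.drop (PySem.Chars.findFrom ut v pos none).toNat ∧
    PySem.Chars.findFrom ut v pos none + (v.length : Int) ≤ (ut.length : Int) ∧
    ∀ j : Int, pos ≤ j → j < PySem.Chars.findFrom ut v pos none → ¬ v <+: ut.drop j.toNat := by
  rcases pvFF ut v pos h0 with hneg | ⟨hge, hge0, hfit⟩
  · omega
  · have hposn : pos ≤ (ut.length : Int) := by
      by_contra hbig
      unfold PySem.Chars.findFrom at hge0 hge hfit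
      simp only [if_neg (by omega : ¬ pos < 0), if_pos (by omega : (ut.length : Int) < pos)] at hge0
      omega
    have hcast : pos = ((pos.toNat : Nat) : Int) := by omega
    rw [hcast] at hpos ⊢
    have hsp := PySem.Chars.findFrom_natCast_spec ut v pos.toNat (by omega) (by omega)
    refine ⟨by exact_mod_cast hsp.1, hsp.2.1, by rw [← hcast]; omega, ?_⟩
    intro j hj hlt hpre
    exact hsp.2.2 j.toNat (by omega) (by omega) hpre

-- soundness: pvFirstValid returns either the length or a valid occurrence at or after pos
theorem pvSound (ut v : List Char) :
    ∀ (fuel : Nat) (pos : Int), 2 ≤ pos →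
      pvFirstValid ut v fuel pos = (ut.length : Int) ∨
        (pvVOcc ut v (pvFirstValid ut v fuel pos) ∧ pos ≤ pvFirstValid ut v fuel pos) := by
  intro fuel
  induction fuel with
  | zero => intro pos _; left; rfl
  | succ fuel ih =>
    intro pos hpos
    simp only [pvFirstValid]
    by_cases hneg : PySem.Chars.findFrom ut v pos none < 0
    · rw [if_pos hneg]; left; rfl
    · rw [if_neg hneg]
      obtain ⟨hge, hpre, hfit, _⟩ := pvFindPos ut v pos (by omega) hneg
      by_cases hskip : (0 < PySem.Chars.findFrom ut v pos none ∧
            PySem.List.pyGet? ut (PySem.Chars.findFrom ut v pos none - 1) = some '-') ∨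
          (PySem.Chars.findFrom ut v pos none + (v.length : Int) < (ut.length : Int) ∧
            PySem.List.pyGet? ut (PySem.Chars.findFrom ut v pos none + (v.length : Int)) = some '-')
      · rw [if_pos hskip]
        rcases ih (PySem.Chars.findFrom ut v pos none + (v.length : Int)) (by omega) with h | ⟨h1, h2⟩
        · left; exact h
        · right; exact ⟨h1, by omega⟩
      · rw [if_neg hskip]
        push_neg at hskip
        right
        refine ⟨⟨by omega, hfit, hpre, ?_, ?_⟩, hge⟩
        · exact hskip.1 (by omega)
        · intro ⟨ha, hb⟩; exact absurd hb (hskip.2 ha)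
      
-- every verb has length ≥ 1, and the only self-overlap among the verbs is EVALUATE at offset 7
theorem pvVerbLen : ∀ s ∈ pvVerbs, 1 ≤ s.toList.length := by decide

theorem pvBorder : ∀ s ∈ pvVerbs, ∀ k ∈ List.range s.toList.length, 1 ≤ k →
    (s.toList.drop k).isPrefixOf s.toList = true → s = "EVALUATE" ∧ k = 7 := by decide

-- element read off a prefix occurrence
theorem pvPrefixGet (v l : List Char) (m t : Nat) (h : v <+: l.drop m) (ht : t < v.length) :
    l[m + t]? = v[t]? := by
  have hv : v = (l.drop m).take v.length := List.prefix_iff_eq_take.mp h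
  calc l[m + t]? = (l.drop m)[t]? := by rw [List.getElem?_drop]
    _ = ((l.drop m).take v.length)[t]? := by rw [List.getElem?_take_of_lt ht]
    _ = v[t]? := by rw [← hv]

-- completeness under the no-pattern hypothesis: the skip loop never passes a valid occurrence
theorem pvComplete (ut : List Char) (s : String) (hs : s ∈ pvVerbs) :
    ∀ (fuel : Nat) (pos j : Int), 2 ≤ pos → pos ≤ j → pvVOcc ut s.toList j →
      (ut.length : Int) < pos + fuel →
      pvFirstValid ut s.toList fuel pos ≤ j ∨
        ∃ k : Nat, 1 ≤ k ∧ (k : Int) + 8 ≤ j ∧ pvPattern <+: ut.drop k ∧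
          ut[k + 16]? ≠ some '-' := by
  intro fuel
  induction fuel with
  | zero =>
    intro pos j _ hpj ⟨_, hfit, _, _, _⟩ hfuel
    left
    simp only [pvFirstValid]
    omega
  | succ fuel ih =>
    intro pos j hpos hpj hocc hfuel
    obtain ⟨hj2, hjfit, hjpre, hjhyp, hjfol⟩ := hocc
    simp only [pvFirstValid]
    by_cases hneg : PySem.Chars.findFrom ut s.toList pos none < 0
    · exfalso
      rcases pvFF ut s.toList pos (by omega) with hm1 | h
      · exact pvFindNeg ut s.toList pos (by omega) hm1 j hpj hjfit hjpre
      · omega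
    · rw [if_neg hneg]
      obtain ⟨hge, hpre, hfit, hmin⟩ := pvFindPos ut s.toList pos (by omega) hneg
      set idx := PySem.Chars.findFrom ut s.toList pos none with hidx
      have hij : idx ≤ j := by
        by_contra hlt
        exact hmin j hpj (by omega) hjpre
      by_cases hskip : (0 < idx ∧ PySem.List.pyGet? ut (idx - 1) = some '-') ∨
          (idx + (s.toList.length : Int) < (ut.length : Int) ∧
            PySem.List.pyGet? ut (idx + (s.toList.length : Int)) = some '-')
      · rw [if_pos hskip]
        have hne : idx ≠ j := by
          rintro rfl
          rcases hskip with ⟨_, h⟩ | ⟨h1, h2⟩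
          · exact hjhyp h
          · exact hjfol ⟨h1, h2⟩
        have hvl := pvVerbLen s hs
        by_cases hfar : idx + (s.toList.length : Int) ≤ j
        · exact ih (idx + (s.toList.length : Int)) j (by omega) hfar
            ⟨hj2, hjfit, hjpre, hjhyp, hjfol⟩ (by omega)
        · -- overlap: idx < j < idx + |v|, so the verb self-overlaps: v = EVALUATE, offset 7
          have hk1 : idx < j := by omega
          have hkk : j.toNat - idx.toNat < s.toList.length := by omega
          have hdj : (ut.drop idx.toNat).drop (j.toNat - idx.toNat) = ut.drop j.toNat := by
            rw [List.drop_drop]; congr 1; omega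
          have hdrop : s.toList.drop (j.toNat - idx.toNat) <+: ut.drop j.toNat := by
            rw [← hdj]; exact hpre.drop _
          have hbord : s.toList.drop (j.toNat - idx.toNat) <+: s.toList :=
            List.prefix_of_prefix_length_le hdrop hjpre (by rw [List.length_drop]; omega)
          obtain ⟨hsE, hk7⟩ := pvBorder s hs (j.toNat - idx.toNat)
            (List.mem_range.mpr hkk) (by omega) (List.isPrefixOf_iff_prefix.mpr hbord)
          subst hsE
          have hlen8 : ("EVALUATE".toList.length : Int) = 8 := by decide
          have hj7 : j = idx + 7 := by omega
          rcases hskip with ⟨_, hhyp⟩ | ⟨hflt, hfol⟩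
          · -- preceded by '-': the pattern '-EVALUATEVALUATE' occurs at idx-1: emit the region witness
            right
            have hk0 : 1 ≤ idx.toNat - 1 := by omega
            have hk0n : idx.toNat - 1 < ut.length := by omega
            have hcons : ut.drop (idx.toNat - 1) = ut[idx.toNat - 1] :: ut.drop idx.toNat := by
              have h1 : idx.toNat - 1 + 1 = idx.toNat := by omega
              rw [List.drop_eq_getElem_cons hk0n, h1]
            have hget : ut[idx.toNat - 1] = '-' := by
              have hcast : idx - 1 = ((idx.toNat - 1 : Nat) : Int) := by omega
              rw [hcast] at hhyp
              rw [PySem.List.pyGet?_natCast] at hhyp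
              rw [List.getElem?_eq_getElem hk0n] at hhyp
              exact Option.some_injective _ hhyp
            -- '-EVALUATEVALUATE' = '-' :: take 7 EVALUATE ++ EVALUATE
            have hd : ut.drop idx.toNat = (ut.drop idx.toNat).take 7 ++ ut.drop j.toNat := by
              conv_lhs => rw [← List.take_append_drop 7 (ut.drop idx.toNat)]
              congr 1
              rw [List.drop_drop]; congr 1; omega
            have htk : (ut.drop idx.toNat).take 7 = "EVALUATE".toList.take 7 := by
              have hv8 : "EVALUATE".toList = (ut.drop idx.toNat).take "EVALUATE".toList.length :=
                List.prefix_iff_eq_take.mp hpre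
              rw [hv8, List.take_take]
              have hm : min 7 "EVALUATE".toList.length = 7 := by decide
              rw [hm]
            have hpat : pvPattern = '-' :: ("EVALUATE".toList.take 7 ++ "EVALUATE".toList) := by decide
            have hpp : pvPattern <+: ut.drop (idx.toNat - 1) := by
              rw [hpat, hcons, hget]
              apply List.cons_prefix_cons.mpr
              refine ⟨rfl, ?_⟩
              rw [hd, ← htk]
              exact (List.prefix_append_right_inj _).mpr hjpre
            refine ⟨idx.toNat - 1, hk0, by omega, hpp, ?_⟩
            intro hel16
            obtain ⟨hlt16, -⟩ := List.getElem?_eq_some_iff.mp hel16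
            apply hjfol
            have hc16 : j + ("EVALUATE".toList.length : Int) = (((idx.toNat - 1) + 16 : Nat) : Int) := by
              omega
            refine ⟨by omega, ?_⟩
            rw [hc16, PySem.List.pyGet?_natCast]
            exact hel16
          · -- followed by '-': impossible, position idx+8 holds the 'V' of the overlap
            have hgv : ut[idx.toNat + 8]? = some 'V' := by
              have := pvPrefixGet "EVALUATE".toList ut j.toNat 1 hjpre (by decide)
              have he : j.toNat + 1 = idx.toNat + 8 := by omega
              rw [he] at this
              rw [this]; decide
            have hcast : idx + ("EVALUATE".toList.length : Int) = ((idx.toNat + 8 : Nat) : Int) := by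
              omega
            rw [hcast, PySem.List.pyGet?_natCast, hgv] at hfol
            exact absurd hfol (by decide)
      · rw [if_neg hskip]
        left
        exact hij

-- fold-min facts
theorem pvFoldlMinLeInit : ∀ (l : List Int) (a : Int), l.foldl min a ≤ a := by
  intro l
  induction l with
  | nil => intro a; simp
  | cons x t ih =>
    intro a
    simp only [List.foldl_cons]
    exact le_trans (ih _) (min_le_left _ _)

theorem pvFoldlMinLe : ∀ (l : List Int) (a x : Int), x ∈ l → l.foldl min a ≤ x := by
  intro l
  induction l with
  | nil => intro a x hx; cases hx
  | cons y t ih =>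
    intro a x hx
    rcases List.mem_cons.mp hx with rfl | hx
    · simp only [List.foldl_cons]
      exact le_trans (pvFoldlMinLeInit _ _) (min_le_right _ _)
    · exact ih _ x hx

theorem pvFoldlMinCases : ∀ (l : List Int) (a : Int), l.foldl min a = a ∨ l.foldl min a ∈ l := by
  intro l
  induction l with
  | nil => intro a; left; rfl
  | cons y t ih =>
    intro a
    simp only [List.foldl_cons]
    rcases ih (min a y) with h | h
    · by_cases hay : a ≤ y
      · left; rw [h, min_eq_left hay]
      · right
        rw [h, min_eq_right (by omega)]
        exact List.mem_cons_self
    · right; right; exact h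

-- A's loop over one verb is min of the incoming bound and the verb's skip-first value
theorem pvL1 (s v : List Char) (c : Int) (hcn : c ≤ (s.length : Int)) :
    ∀ (fuel : Nat) (q : Int), 0 ≤ q → c ≤ q → c ≤ pvFirstValid s v fuel q := by
  intro fuel
  induction fuel with
  | zero => intro q _ _; simp only [pvFirstValid]; exact hcn
  | succ fuel ih =>
    intro q hq0 hcq
    simp only [pvFirstValid]
    rcases pvFF s v q hq0 with hneg | ⟨hge, h0, hfit⟩
    · rw [if_pos (by omega)]; exact hcn
    · rw [if_neg (by omega)]
      split_ifs with hskip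
      · exact ih _ (by omega) (by omega)
      · omega

theorem pvM (s v : List Char) :
    ∀ (fuel : Nat) (b p : Int), 0 ≤ p → 0 ≤ b → b ≤ (s.length : Int) →
      pvLoopA s v fuel b p = min b (pvFirstValid s v fuel p) := by
  intro fuel
  induction fuel with
  | zero =>
    intro b p _ _ hbn
    simp only [pvLoopA, pvFirstValid]
    omega
  | succ fuel ih =>
    intro b p hp0 hb0 hbn
    by_cases hpb : p < b
    · simp only [pvLoopA, pvFirstValid]
      rw [if_pos hpb]
      rcases pvFF s v p hp0 with hneg | ⟨hge, h0, hfit⟩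
      · rw [if_pos (by omega), if_pos (by omega)]
        omega
      · rw [if_neg (by omega : ¬ PySem.Chars.findFrom s v p none < 0)]
        by_cases hbig : b ≤ PySem.Chars.findFrom s v p none
        · rw [if_pos (by omega)]
          split_ifs with hskip
          · have := pvL1 s v b hbn fuel (PySem.Chars.findFrom s v p none + (v.length : Int))
              (by omega) (by omega)
            omega
          · omega
        · rw [if_neg (by omega)]
          by_cases hpre : 0 < PySem.Chars.findFrom s v p none ∧
              PySem.List.pyGet? s (PySem.Chars.findFrom s v p none - 1) = some '-'
          · rw [if_pos hpre, if_pos (Or.inl hpre)]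
            exact ih _ _ (by omega) hb0 hbn
          · rw [if_neg hpre]
            by_cases hpost : PySem.Chars.findFrom s v p none + (v.length : Int) < (s.length : Int) ∧
                PySem.List.pyGet? s (PySem.Chars.findFrom s v p none + (v.length : Int)) = some '-'
            · rw [if_pos hpost, if_pos (Or.inr hpost)]
              exact ih _ _ (by omega) hb0 hbn
            · rw [if_neg hpost, if_neg (by tauto)]
              omega
    · have hA : pvLoopA s v (fuel+1) b p = b := by
        simp only [pvLoopA]; rw [if_neg hpb]
      have := pvL1 s v b hbn (fuel+1) p hp0 (by omega)
      omega

theorem pvFoldEq (s : List Char) :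
    ∀ (l : List String) (b : Int), 0 ≤ b → b ≤ (s.length : Int) →
      l.foldl (fun best v => pvLoopA s v.toList (s.length + 1) best 2) b =
      (l.map (fun v => pvFirstValid s v.toList (s.length + 1) 2)).foldl min b := by
  intro l
  induction l with
  | nil => intro b _ _; rfl
  | cons v t ih =>
    intro b hb0 hbn
    simp only [List.foldl_cons, List.map_cons]
    rw [pvM s v.toList _ b 2 (by omega) hb0 hbn]
    have hf0 : 0 ≤ pvFirstValid s v.toList (s.length + 1) 2 :=
      pvL1 s v.toList 0 (by omega) _ 2 (by omega) (by omega)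
    exact ih _ (by omega) (by omega)

-- pvBestA: ≤ every skip-first value, and is n or one of them
theorem pvBestRep (ut : List Char) :
    pvBestA ut =
      (pvVerbs.map (fun v => pvFirstValid ut v.toList (ut.length + 1) 2)).foldl min (ut.length : Int) := by
  unfold pvBestA
  exact pvFoldEq ut pvVerbs (ut.length : Int) (by omega) (by omega)

theorem pvBestLe (ut : List Char) (s : String) (hs : s ∈ pvVerbs) :
    pvBestA ut ≤ pvFirstValid ut s.toList (ut.length + 1) 2 := by
  rw [pvBestRep]
  exact pvFoldlMinLe _ _ _ (List.mem_map.mpr ⟨s, hs, rfl⟩)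

theorem pvBestCases (ut : List Char) :
    pvBestA ut = (ut.length : Int) ∨
      ∃ s ∈ pvVerbs, pvBestA ut = pvFirstValid ut s.toList (ut.length + 1) 2 := by
  rw [pvBestRep]
  rcases pvFoldlMinCases (pvVerbs.map (fun v => pvFirstValid ut v.toList (ut.length + 1) 2))
      (ut.length : Int) with h | h
  · left; exact h
  · right
    obtain ⟨s, hs, he⟩ := List.mem_map.mp h
    exact ⟨s, hs, he.symm⟩

-- B's positional test ↔ some verb has a valid occurrence there
theorem pvValidAtIff (ut : List Char) (i : Int) (h2 : 2 ≤ i) :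
    pvValidAt ut i = true ↔ ∃ s ∈ pvVerbs, pvVOcc ut s.toList i := by
  unfold pvValidAt
  simp only [Bool.and_eq_true, List.any_eq_true, Bool.not_eq_true', beq_eq_false_iff_ne,
    beq_iff_eq, decide_eq_true_eq, Bool.not_eq_true, Bool.and_eq_false_iff,
    decide_eq_false_iff_not]
  constructor
  · rintro ⟨hhyp, s, hs, hsl, hfol⟩
    refine ⟨s, hs, h2, ?_, ?_, hhyp, ?_⟩
    · exact ((pvSliceEq ut s.toList i (by omega) (pvVerbLen s hs)).mp hsl).2
    · exact ((pvSliceEq ut s.toList i (by omega) (pvVerbLen s hs)).mp hsl).1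
    · rintro ⟨ha, hb⟩
      rcases hfol with h | h
      · exact h ha
      · rw [hb] at h; simp at h
  · rintro ⟨s, hs, _, hfit, hpre, hhyp, hfol⟩
    refine ⟨hhyp, s, hs, (pvSliceEq ut s.toList i (by omega) (pvVerbLen s hs)).mpr ⟨hpre, hfit⟩, ?_⟩
    by_cases ha : i + (s.toList.length : Int) < (ut.length : Int)
    · right
      intro he
      exact hfol ⟨ha, by rw [he]⟩
    · left; exact ha

-- find? over an integer range returns the first element satisfying the test
theorem pvRangeNil (a b : Int) (h : b ≤ a) : PySem.List.pyRange a b 1 = [] := by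
  cases he : PySem.List.pyRange a b 1 with
  | nil => rfl
  | cons x t =>
    have hx : x ∈ PySem.List.pyRange a b 1 := by rw [he]; exact List.mem_cons_self
    have := PySem.List.mem_pyRange_one.mp hx; omega

theorem pvFindSome (p : Int → Bool) :
    ∀ (m : Nat) (a b i : Int), (b - a).toNat ≤ m →
      (PySem.List.pyRange a b 1).find? p = some i →
      a ≤ i ∧ i < b ∧ p i = true ∧ ∀ j, a ≤ j → j < i → p j = false := by
  intro m
  induction m with
  | zero =>
    intro a b i hm hf
    rw [pvRangeNil a b (by omega)] at hf
    simp at hf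
  | succ m ih =>
    intro a b i hm hf
    by_cases hab : b ≤ a
    · rw [pvRangeNil a b hab] at hf; simp at hf
    · rw [PySem.List.pyRange_one_cons (by omega)] at hf
      rw [List.find?_cons] at hf
      cases hpa : p a with
      | true =>
        rw [hpa] at hf
        simp only [Option.some.injEq] at hf
        subst hf
        exact ⟨le_refl _, by omega, hpa, fun j h1 h2 => by omega⟩
      | false =>
        rw [hpa] at hf
        obtain ⟨h1, h2, h3, h4⟩ := ih (a+1) b i (by omega) hf
        refine ⟨by omega, h2, h3, ?_⟩
        intro j hj1 hj2
        rcases eq_or_lt_of_le hj1 with rfl | hlt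
        · exact hpa
        · exact h4 j (by omega) hj2

theorem pvFindNone (p : Int → Bool) (a b : Int)
    (hf : (PySem.List.pyRange a b 1).find? p = none) :
    ∀ j, a ≤ j → j < b → p j = false := by
  intro j h1 h2
  have := List.find?_eq_none.mp hf j (PySem.List.mem_pyRange_one.mpr ⟨h1, h2⟩)
  simpa using this

-- central agreement: under the no-pattern hypothesis A's best equals B's scan result
theorem pvAgreeSome (ut : List Char) (hND : ¬ pvDiffCore ut)
    (i : Int) (hf : (PySem.List.pyRange 2 (ut.length : Int) 1).find? (fun i => pvValidAt ut i) = some i) :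
    pvBestA ut = i ∧ i < (ut.length : Int) := by
  obtain ⟨h2i, hin, hpi, hmin⟩ := pvFindSome _ ((ut.length : Int) - 2).toNat 2 (ut.length : Int) i
    (le_refl _) hf
  obtain ⟨s, hs, hocc⟩ := (pvValidAtIff ut i h2i).mp hpi
  have hnov : ∀ m : Int, 2 ≤ m → m < i → ∀ s' ∈ pvVerbs, ¬ pvVOcc ut s'.toList m := by
    intro m hm2 hmi s' hs' hocc'
    have hv : pvValidAt ut m = true := (pvValidAtIff ut m hm2).mpr ⟨s', hs', hocc'⟩
    have := hmin m hm2 hmi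
    rw [hv] at this
    exact absurd this (by simp)
  have hle : pvBestA ut ≤ i := by
    rcases pvComplete ut s hs (ut.length + 1) 2 i (by omega) h2i hocc (by omega) with
      h | ⟨k, hk1, hk8, hkp, hkv⟩
    · exact le_trans (pvBestLe ut s hs) h
    · exfalso
      apply hND
      have hkn : k < ut.length := by
        have hl := hkp.length_le
        rw [List.length_drop] at hl
        have hplen : pvPattern.length = 16 := by decide
        omega
      refine ⟨k, List.mem_range.mpr hkn, hk1, hkp, hkv, ?_⟩
      intro m hmr s' hs' hoccN
      have hm8 : m < k + 8 := List.mem_range.mp hmr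
      have hocc' := (pvVOccN_iff ut s'.toList m (pvVerbLen s' hs')).mp hoccN
      exact hnov (m : Int) hocc'.1 (by omega) s' hs' hocc'
  have hge : i ≤ pvBestA ut := by
    rcases pvBestCases ut with hbn | ⟨s', hs', hb⟩
    · omega
    · rcases pvSound ut s'.toList (ut.length + 1) 2 (by omega) with hn | ⟨hocc', hge2⟩
      · omega
      · rw [← hb] at hocc' hge2
        by_contra hlt
        have hvb : pvValidAt ut (pvBestA ut) = true :=
          (pvValidAtIff ut (pvBestA ut) (by omega)).mpr ⟨s', hs', hocc'⟩
        have := hmin (pvBestA ut) (by omega) (by omega)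
        rw [hvb] at this
        exact absurd this (by simp)
  exact ⟨by omega, hin⟩

theorem pvAgreeNone (ut : List Char)
    (hf : (PySem.List.pyRange 2 (ut.length : Int) 1).find? (fun i => pvValidAt ut i) = none) :
    pvBestA ut = (ut.length : Int) := by
  rcases pvBestCases ut with hbn | ⟨s, hs, hb⟩
  · exact hbn
  · rcases pvSound ut s.toList (ut.length + 1) 2 (by omega) with hn | ⟨hocc, hge⟩
    · rw [hb]; exact hn
    · exfalso
      rw [← hb] at hocc hge
      have h2 := hocc.1
      have hfit := hocc.2.1
      have hvl := pvVerbLen s hs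
      have hlt : pvBestA ut < (ut.length : Int) := by omega
      have hval : pvValidAt ut (pvBestA ut) = true :=
        (pvValidAtIff ut (pvBestA ut) h2).mpr ⟨s, hs, hocc⟩
      have := pvFindNone _ 2 (ut.length : Int) hf (pvBestA ut) h2 hlt
      rw [hval] at this
      exact absurd this (by simp)

-- first-element introduction for find? over an integer range
theorem pvFindSomeIntro (p : Int → Bool) :
    ∀ (m : Nat) (a b i : Int), (b - a).toNat ≤ m → a ≤ i → i < b → p i = true →
      (∀ j, a ≤ j → j < i → p j = false) →
      (PySem.List.pyRange a b 1).find? p = some i := by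
  intro m
  induction m with
  | zero =>
    intro a b i hm hai hib _ _
    exact absurd hib (by omega)
  | succ m ih =>
    intro a b i hm hai hib hpi hmin
    rw [PySem.List.pyRange_one_cons (by omega), List.find?_cons]
    rcases eq_or_lt_of_le hai with rfl | hlt
    · rw [hpi]
    · rw [hmin a (le_refl _) hlt]
      exact ih (a+1) b i (by omega) (by omega) hib hpi (fun j h1 h2 => hmin j (by omega) h2)

-- no two distinct verbs start at the same position: among the verbs only EVALUATE is
-- prefix-comparable with EVALUATE
theorem pvOnlyEvalAux : ∀ s ∈ pvVerbs,
    (s.toList.isPrefixOf "EVALUATE".toList = true ∨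
      "EVALUATE".toList.isPrefixOf s.toList = true) → s = "EVALUATE" := by decide

theorem pvOnlyEval (s : String) (hs : s ∈ pvVerbs) (d : List Char)
    (h1 : s.toList <+: d) (h2 : "EVALUATE".toList <+: d) : s = "EVALUATE" := by
  rcases le_total s.toList.length ("EVALUATE".toList.length) with h | h
  · exact pvOnlyEvalAux s hs
      (Or.inl (List.isPrefixOf_iff_prefix.mpr (List.prefix_of_prefix_length_le h1 h2 h)))
  · exact pvOnlyEvalAux s hs
      (Or.inr (List.isPrefixOf_iff_prefix.mpr (List.prefix_of_prefix_length_le h2 h1 h)))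

-- A's EVALUATE search never stops at jd+7 when a hyphen-prefixed EVALUATE occurrence sits at jd
theorem pvSkip (ut : List Char) (jd : Int) (hj2 : 2 ≤ jd) (hn : jd + 8 ≤ (ut.length : Int))
    (hocc : "EVALUATE".toList <+: ut.drop jd.toNat)
    (hhyp : PySem.List.pyGet? ut (jd - 1) = some '-') :
    ∀ (fuel : Nat) (pos : Int), 2 ≤ pos → (pos ≤ jd ∨ jd + 8 ≤ pos) →
      pvFirstValid ut "EVALUATE".toList fuel pos ≠ jd + 7 := by
  intro fuel
  induction fuel with
  | zero =>
    intro pos _ _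
    simp only [pvFirstValid]
    omega
  | succ fuel ih =>
    intro pos hp2 hpd
    rcases hpd with hpd | hpd
    · simp only [pvFirstValid]
      by_cases hneg : PySem.Chars.findFrom ut "EVALUATE".toList pos none < 0
      · rw [if_pos hneg]; omega
      · rw [if_neg hneg]
        obtain ⟨hge, hpre, hfit, hmin⟩ := pvFindPos ut "EVALUATE".toList pos (by omega) hneg
        set idx := PySem.Chars.findFrom ut "EVALUATE".toList pos none with hidx
        have hijd : idx ≤ jd := by
          by_contra hlt
          exact hmin jd hpd (by omega) hocc
        have hlen8 : ("EVALUATE".toList.length : Int) = 8 := by decide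
        by_cases hskip : (0 < idx ∧ PySem.List.pyGet? ut (idx - 1) = some '-') ∨
            (idx + ("EVALUATE".toList.length : Int) < (ut.length : Int) ∧
              PySem.List.pyGet? ut (idx + ("EVALUATE".toList.length : Int)) = some '-')
        · rw [if_pos hskip]
          have hcase : idx + 8 ≤ jd ∨ idx = jd := by
            by_contra hcon
            push_neg at hcon
            obtain ⟨hlt8, hne⟩ := hcon
            have hk1 : idx < jd := by omega
            have hkk : jd.toNat - idx.toNat < "EVALUATE".toList.length := by omega
            have hdj : (ut.drop idx.toNat).drop (jd.toNat - idx.toNat) = ut.drop jd.toNat := by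
              rw [List.drop_drop]; congr 1; omega
            have hdrop : "EVALUATE".toList.drop (jd.toNat - idx.toNat) <+: ut.drop jd.toNat := by
              rw [← hdj]; exact hpre.drop _
            have hbord : "EVALUATE".toList.drop (jd.toNat - idx.toNat) <+: "EVALUATE".toList :=
              List.prefix_of_prefix_length_le hdrop hocc (by rw [List.length_drop]; omega)
            obtain ⟨-, hk7⟩ := pvBorder "EVALUATE" (by decide) (jd.toNat - idx.toNat)
              (List.mem_range.mpr hkk) (by omega) (List.isPrefixOf_iff_prefix.mpr hbord)
            -- idx = jd - 7: then ut[jd-1] is the 'T' of the occurrence at idx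
            have hT : ut[idx.toNat + 6]? = some 'T' := by
              have := pvPrefixGet "EVALUATE".toList ut idx.toNat 6 hpre (by decide)
              rw [this]; decide
            have hcast : jd - 1 = ((idx.toNat + 6 : Nat) : Int) := by omega
            rw [hcast, PySem.List.pyGet?_natCast, hT] at hhyp
            exact absurd hhyp (by decide)
          rcases hcase with hfar | rfl
          · exact ih (idx + ("EVALUATE".toList.length : Int)) (by omega) (Or.inl (by omega))
          · exact ih (idx + ("EVALUATE".toList.length : Int)) (by omega) (Or.inr (by omega))
        · rw [if_neg hskip]
          omega
    · intro hres
      have := pvL1 ut "EVALUATE".toList (jd + 8) hn (fuel + 1) pos (by omega) (by omega)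
      omega

-- the second EVALUATE of the pattern is a valid occurrence
theorem pvEvalAt (ut : List Char) (k : Nat)
    (hpat : pvPattern <+: ut.drop k)
    (hvj : ut[k + 16]? ≠ some '-') :
    pvVOcc ut "EVALUATE".toList ((k : Int) + 8) := by
  have hplen : pvPattern.length = 16 := by decide
  have hfit : k + 16 ≤ ut.length := by
    have := hpat.length_le
    rw [List.length_drop] at this
    omega
  have hlen8 : ("EVALUATE".toList.length : Int) = 8 := by decide
  have hpre8 : "EVALUATE".toList <+: ut.drop (k + 8) := by
    have h1 : pvPattern.drop 8 <+: (ut.drop k).drop 8 := hpat.drop 8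
    rw [List.drop_drop] at h1
    have he : pvPattern.drop 8 = "EVALUATE".toList := by decide
    rw [he] at h1
    exact h1
  refine ⟨by omega, by omega, ?_, ?_, ?_⟩
  · have hc : ((k : Int) + 8).toNat = k + 8 := by omega
    rw [hc]; exact hpre8
  · have hT : ut[k + 7]? = some 'T' := by
      have := pvPrefixGet pvPattern ut k 7 hpat (by decide)
      rw [this]; decide
    have hc : (k : Int) + 8 - 1 = ((k + 7 : Nat) : Int) := by omega
    rw [hc, PySem.List.pyGet?_natCast, hT]
    decide
  · rintro ⟨hlt, hel⟩
    apply hvj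
    have hc : (k : Int) + 8 + ("EVALUATE".toList.length : Int) = ((k + 16 : Nat) : Int) := by omega
    rw [hc, PySem.List.pyGet?_natCast] at hel
    exact hel

-- upper-casing does not change whitespace, so strip commutes with upper (length preserved)
theorem pvIsspaceUpper (c : Char) :
    PySem.Chars.isspace (PySem.Chars.upperChar c) = PySem.Chars.isspace c := by
  unfold PySem.Chars.upperChar PySem.Chars.islower
  split
  · next h =>
    simp only [Bool.and_eq_true, decide_eq_true_eq] at h
    have h1 : 97 ≤ c.toNat := h.1
    have h2 : c.toNat ≤ 122 := h.2
    have ht : (Char.ofNat (c.toNat - 32)).toNat = c.toNat - 32 := by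
      unfold Char.ofNat
      rw [dif_pos (by constructor <;> omega)]
      rfl
    unfold PySem.Chars.isspace
    simp only [ht]
    have hgen : ∀ n : Nat, 65 ≤ n → n ≤ 122 →
        ((decide (n = 32) || decide (9 ≤ n) && decide (n ≤ 13) ||
          decide (28 ≤ n) && decide (n ≤ 31) || decide (n = 133) || decide (n = 160) ||
          decide (n = 5760) || decide (8192 ≤ n) && decide (n ≤ 8202) || decide (n = 8232) ||
          decide (n = 8233) || decide (n = 8239) || decide (n = 8287) ||
          decide (n = 12288)) = false) := by
      intro n hn1 hn2
      simp only [Bool.or_eq_false_iff, Bool.and_eq_false_iff, decide_eq_false_iff_not]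
      omega
    rw [hgen _ (by omega) (by omega), hgen _ (by omega) (by omega)]
  · rfl

theorem pvStripUpper (l : List Char) :
    PySem.Chars.strip (PySem.Chars.upper l) = PySem.Chars.upper (PySem.Chars.strip l) := by
  have hc : (PySem.Chars.isspace ∘ PySem.Chars.upperChar) = PySem.Chars.isspace :=
    funext pvIsspaceUpper
  simp only [PySem.Chars.strip, PySem.Chars.lstrip, PySem.Chars.rstrip, PySem.Chars.upper]
  rw [List.dropWhile_map, hc, ← List.map_reverse, List.dropWhile_map, hc, ← List.map_reverse]

theorem pvStripUpperLen (l : List Char) :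
    (PySem.Chars.strip (PySem.Chars.upper l)).length = (PySem.Chars.strip l).length := by
  rw [pvStripUpper]
  simp [PySem.Chars.upper]

-- the trimmed original and trimmed upper text have the same length
theorem pvLenEq (text : String) :
    (PySem.Str.slice (PySem.Str.strip (PySem.Str.upper text)) none (some (-11))).toList.length
      = (PySem.Str.slice (PySem.Str.strip text) none (some (-11))).toList.length := by
  simp [pysem, pvStripUpperLen]

-- ===== VERDICT (by name: the statement is the Claim_ definition above) =====
theorem split_inline_perform_body_py_spec : Claim_unchanged_split_inline_perform_body_py := by
  intro text _
  unfold Spec_split_inline_perform_body_py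
  intro hnD
  simp only [split_inline_perform_body_py, split_inline_perform_body_py_alt]
  cases hB : PySem.Str.endswith (PySem.Str.strip (PySem.Str.upper text)) "END-PERFORM" with
  | false => rw [if_pos rfl, if_pos rfl]
  | true =>
    by_cases h2 : PySem.Str.slice (PySem.Str.strip text) none (some (-11)) = ""
    · rw [if_neg (by decide : ¬(true = false)), if_pos h2,
         if_neg (by decide : ¬(true = false)), if_pos h2]
    · rw [if_neg (by decide : ¬(true = false)), if_neg h2,
         if_neg (by decide : ¬(true = false)), if_neg h2]
      set ut := (PySem.Str.slice (PySem.Str.strip (PySem.Str.upper text)) none (some (-11))).toList with hut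
      have hND : ¬ pvDiffCore ut := fun hc => hnD ⟨hB, h2, hc⟩
      cases hf : (PySem.List.pyRange 2 (ut.length : Int) 1).find? (fun i => pvValidAt ut i) with
      | some i =>
        obtain ⟨hbi, hin⟩ := pvAgreeSome ut hND i hf
        rw [hbi, if_pos hin]
      | none =>
        have hbn := pvAgreeNone ut hf
        rw [hbn, if_neg (by omega)]

set_option maxRecDepth 1000000 in
set_option maxHeartbeats 2000000 in
theorem split_inline_perform_body_py_changed : Claim_changed_split_inline_perform_body_py := by
  unfold Claim_changed_split_inline_perform_body_py; decide

set_option maxHeartbeats 2000000 in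
theorem split_inline_perform_body_py_tight : Claim_exact_split_inline_perform_body_py := by
  intro text _ hD
  obtain ⟨hB, h2, hcore⟩ := hD
  simp only [split_inline_perform_body_py, split_inline_perform_body_py_alt]
  rw [hB]
  rw [if_neg (by decide : ¬(true = false)), if_neg h2,
      if_neg (by decide : ¬(true = false)), if_neg h2]
  set trimmed := PySem.Str.slice (PySem.Str.strip text) none (some (-11)) with htr
  set ut := (PySem.Str.slice (PySem.Str.strip (PySem.Str.upper text)) none (some (-11))).toList
    with hut
  obtain ⟨k, hkr, hk1, hkp, hkv, hnov⟩ := hcore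
  have hkn : k < ut.length := List.mem_range.mp hkr
  have hplen : pvPattern.length = 16 := by decide
  have hfit16 : k + 16 ≤ ut.length := by
    have := hkp.length_le
    rw [List.length_drop] at this
    omega
  have hL : trimmed.toList.length = ut.length := by
    rw [htr, hut]
    exact (pvLenEq text).symm
  have hvocc := pvEvalAt ut k hkp hkv
  have hvalid : pvValidAt ut ((k : Int) + 8) = true :=
    (pvValidAtIff ut ((k : Int) + 8) (by omega)).mpr ⟨"EVALUATE", by decide, hvocc⟩
  have hfalse : ∀ j : Int, 2 ≤ j → j < (k : Int) + 8 → pvValidAt ut j = false := by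
    intro j hj2 hjlt
    cases hv : pvValidAt ut j with
    | false => rfl
    | true =>
      exfalso
      obtain ⟨s, hs, hocc⟩ := (pvValidAtIff ut j hj2).mp hv
      have hmem : j.toNat ∈ List.range (k + 8) := List.mem_range.mpr (by omega)
      have hc : ((j.toNat : Nat) : Int) = j := by omega
      exact hnov j.toNat hmem s hs
        ((pvVOccN_iff ut s.toList j.toNat (pvVerbLen s hs)).mpr (by rw [hc]; exact hocc))
  have hf : (PySem.List.pyRange 2 (ut.length : Int) 1).find? (fun i => pvValidAt ut i) =
      some ((k : Int) + 8) :=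
    pvFindSomeIntro _ ((ut.length : Int) - 2).toNat 2 (ut.length : Int) ((k : Int) + 8)
      (le_refl _) (by omega) (by omega) hvalid (fun j h1 h2 => hfalse j h1 h2)
  rw [hf]
  -- the EVALUATE occurrence of the pattern at jd = k+1
  have hoccJd : "EVALUATE".toList <+: ut.drop ((k : Int) + 1).toNat := by
    have h1 : pvPattern.drop 1 <+: (ut.drop k).drop 1 := hkp.drop 1
    rw [List.drop_drop] at h1
    have hpe : "EVALUATE".toList <+: pvPattern.drop 1 := by decide
    have hc : ((k : Int) + 1).toNat = k + 1 := by omega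
    rw [hc]
    exact hpe.trans h1
  have hhypJd : PySem.List.pyGet? ut ((k : Int) + 1 - 1) = some '-' := by
    have hm : ut[k + 0]? = some '-' := by
      have := pvPrefixGet pvPattern ut k 0 hkp (by decide)
      rw [this]; decide
    have hc : (k : Int) + 1 - 1 = ((k : Nat) : Int) := by omega
    rw [hc, PySem.List.pyGet?_natCast]
    simpa using hm
  -- A's split position is n or at least k+9
  have hbest : pvBestA ut = (ut.length : Int) ∨
      ((k : Int) + 9 ≤ pvBestA ut ∧ pvBestA ut < (ut.length : Int) ∧ 0 ≤ pvBestA ut) := by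
    rcases pvBestCases ut with hbn | ⟨s, hs, hb⟩
    · left; exact hbn
    · rcases pvSound ut s.toList (ut.length + 1) 2 (by omega) with hn | ⟨hocc, -⟩
      · left; rw [hb]; exact hn
      · right
        rw [← hb] at hocc
        have h2b := hocc.1
        have hge8 : (k : Int) + 8 ≤ pvBestA ut := by
          by_contra hlt
          have hmem : (pvBestA ut).toNat ∈ List.range (k + 8) := List.mem_range.mpr (by omega)
          have hc : (((pvBestA ut).toNat : Nat) : Int) = pvBestA ut := by omega
          exact hnov (pvBestA ut).toNat hmem s hs
            ((pvVOccN_iff ut s.toList (pvBestA ut).toNat (pvVerbLen s hs)).mpr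
              (by rw [hc]; exact hocc))
        have hne : pvBestA ut ≠ (k : Int) + 8 := by
          intro heq
          have hsE : s = "EVALUATE" := by
            apply pvOnlyEval s hs (ut.drop ((k : Int) + 8).toNat)
            · rw [← heq]; exact hocc.2.2.1
            · exact hvocc.2.2.1
          subst hsE
          apply pvSkip ut ((k : Int) + 1) (by omega) (by omega) hoccJd hhypJd
            (ut.length + 1) 2 (by omega) (Or.inl (by omega))
          rw [← hb, heq]
          omega
        have hfitb := hocc.2.1
        have hvl := pvVerbLen s hs
        exact ⟨by omega, by omega, by omega⟩
  -- now compare the outputs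
  have hLb : k + 16 ≤ trimmed.toList.length := by omega
  rcases hbest with hbn | ⟨hb9, hblt, hb0⟩
  · rw [hbn, if_neg (by omega)]
    intro h
    have h2nd := congrArg (fun q : String × String => q.2.toList.length) h
    simp only at h2nd
    rw [show ("" : String).toList = [] from rfl] at h2nd
    have hslice : (PySem.Str.slice trimmed (some ((k : Int) + 8)) none).toList =
        trimmed.toList.drop ((k : Int) + 8).toNat := by
      simp [pysem, PySem.List.slice_from _ (by omega : (0:Int) ≤ (k : Int) + 8)]
    rw [hslice] at h2nd
    rw [List.length_drop] at h2nd
    simp only [List.length_nil] at h2nd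
    omega
  · rw [if_pos hblt]
    intro h
    have h1st := congrArg (fun q : String × String => q.1.toList.length) h
    simp only at h1st
    have hs1 : (PySem.Str.slice trimmed none (some (pvBestA ut))).toList =
        trimmed.toList.take (pvBestA ut).toNat := by
      simp [pysem, PySem.List.slice_to _ hb0]
    have hs2 : (PySem.Str.slice trimmed none (some ((k : Int) + 8))).toList =
        trimmed.toList.take ((k : Int) + 8).toNat := by
      simp [pysem, PySem.List.slice_to _ (by omega : (0:Int) ≤ (k : Int) + 8)]
    rw [hs1, hs2, List.length_take, List.length_take] at h1st
    omega
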